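-- pv_equiv track=rewrite | github.com/stephane1109/ATA | analyse_cooccurrences.py | read_and_preprocess_file
-- ===== SOURCE A (Python) =====
-- def read_and_preprocess_file(file_content):
--     articles = []
--     current_article = []
--     for line in file_content.splitlines():
--         if line.startswith('****'):
--             if current_article:
--                 articles.append(' '.join(current_article).strip())
--                 current_article = []
--         else:
--             current_article.append(line)
--     if current_article:
--         articles.append(' '.join(current_article).strip())
--     return articles
-- ===== SOURCE B (Python) =====
-- def read_and_preprocess_file(file_content):
--     # Two-pointer scan over maximal runs of non-delimiter lines; each run flushes one article.
--     lines = file_content.splitlines()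
--     n = len(lines)
--     articles = []
--     i = 0
--     while i < n:
--         if lines[i].startswith('****'):
--             i += 1
--         else:
--             j = i
--             while j < n and not lines[j].startswith('****'):
--                 j += 1
--             articles.append(' '.join(lines[i:j]).strip())
--             i = j
--     return articles
-- ===== Notes on version B (the rewrite author's own statement) =====
-- stated objective: alternative
-- what changed: Replaces the accumulator loop (pending current_article list flushed on delimiters and at EOF) with a two-pointer scan that finds each maximal run of non-delimiter lines and emits it directly.
import Mathlib
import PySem

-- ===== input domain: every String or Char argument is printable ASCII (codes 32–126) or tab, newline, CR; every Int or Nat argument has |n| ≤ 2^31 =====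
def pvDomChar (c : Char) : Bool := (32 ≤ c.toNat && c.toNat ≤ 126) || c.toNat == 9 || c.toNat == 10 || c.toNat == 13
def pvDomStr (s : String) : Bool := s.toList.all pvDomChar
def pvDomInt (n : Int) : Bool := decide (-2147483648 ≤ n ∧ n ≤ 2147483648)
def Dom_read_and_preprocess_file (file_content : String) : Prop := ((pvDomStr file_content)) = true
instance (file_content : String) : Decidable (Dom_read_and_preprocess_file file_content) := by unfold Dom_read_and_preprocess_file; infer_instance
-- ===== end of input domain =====

-- B replaces A's pending-accumulator loop with a scan over maximal non-delimiter runs (alternative decomposition).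

-- ===== PORT A =====
-- A's loop state: (articles, current_article); flushed on delimiter lines and once at the end.
def pvStepA (st : List String × List String) (line : String) : List String × List String :=
  if PySem.Str.startswith line "****" then
    if st.2 ≠ [] then (st.1 ++ [PySem.Str.strip (PySem.Str.join " " st.2)], []) else st
  else (st.1, st.2 ++ [line])

def read_and_preprocess_file (file_content : String) : List String :=
  let st := (PySem.Str.splitlines file_content).foldl pvStepA ([], [])
  if st.2 ≠ [] then st.1 ++ [PySem.Str.strip (PySem.Str.join " " st.2)] else st.1

-- ===== PORT B =====
def pvContent (line : String) : Bool := !PySem.Str.startswith line "****"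

-- the inner two-pointer scan of Source B: on a content line, lines[i:j] is the maximal
-- content run (takeWhile) and the scan resumes at j (dropWhile)
def pvRuns : List String → List String
  | [] => []
  | l :: ls =>
    if PySem.Str.startswith l "****" then pvRuns ls
    else PySem.Str.strip (PySem.Str.join " " (l :: ls.takeWhile pvContent)) ::
         pvRuns (ls.dropWhile pvContent)
termination_by ls => ls.length
decreasing_by
  · simp
  · have := List.length_dropWhile_le pvContent ls; simp at *; omega

def read_and_preprocess_file_alt (file_content : String) : List String :=
  pvRuns (PySem.Str.splitlines file_content)

-- ===== PRECONDITION & SPEC =====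
def Spec_read_and_preprocess_file (file_content : String) (out : List String) : Prop := out = read_and_preprocess_file_alt file_content
instance (file_content : String) (out : List String) : Decidable (Spec_read_and_preprocess_file file_content out) := by unfold Spec_read_and_preprocess_file; infer_instance

-- ===== CLAIM (what is proved, stated in full; the proofs are below) =====
def Claim_equal_read_and_preprocess_file : Prop := ∀ (file_content : String), Dom_read_and_preprocess_file file_content → Spec_read_and_preprocess_file file_content (read_and_preprocess_file file_content)

-- ===== LEMMAS AND PROOFS =====

-- what A's fold still produces from state (arts, cur) on remaining lines ls
def pvPend (cur : List String) (ls : List String) : List String :=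
  if cur = [] then pvRuns ls
  else PySem.Str.strip (PySem.Str.join " " (cur ++ ls.takeWhile pvContent)) ::
       pvRuns (ls.dropWhile pvContent)

theorem pvFinish_foldl (ls : List String) : ∀ (arts cur : List String),
    (let st := ls.foldl pvStepA (arts, cur)
     if st.2 ≠ [] then st.1 ++ [PySem.Str.strip (PySem.Str.join " " st.2)] else st.1)
    = arts ++ pvPend cur ls := by
  induction ls with
  | nil =>
    intro arts cur
    by_cases h : cur = [] <;> simp [pvPend, h, pvRuns]
  | cons l ls ih =>
    intro arts cur
    by_cases hd : PySem.Chars.startswith l.toList ['*','*','*','*'] = true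
    · by_cases h : cur = []
      · simpa [pvStepA, hd, h, pvPend, pvRuns] using ih arts []
      · have := ih (arts ++ [PySem.Str.strip (PySem.Str.join " " cur)]) []
        simp [pvStepA, hd, h, pvPend, pvRuns, pvContent] at this ⊢
        simp [this]
    · have := ih arts (cur ++ [l])
      by_cases h : cur = [] <;>
        simp [pvStepA, hd, h, pvPend, pvRuns, pvContent] at this ⊢ <;>
        simp [this]

-- ===== VERDICT (by name: the statement is the Claim_ definition above) =====
theorem read_and_preprocess_file_spec : Claim_equal_read_and_preprocess_file := by
  intro fc _
  unfold Spec_read_and_preprocess_file read_and_preprocess_file read_and_preprocess_file_alt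
  simpa [pvPend] using pvFinish_foldl (PySem.Str.splitlines fc) [] []
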